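-- pv_equiv track=rewrite | github.com/jaynilpatel/codesignal | The Core/phoneCall.py | phoneCall
-- ===== SOURCE A (Python) =====
-- def phoneCall(min1, min2_10, min11, s):
--     tot_min = 0
--     if s < min1:
--         return tot_min
--     s = s - min1
--     tot_min += 1
--     for _ in range(2, 11):
--         if s < min2_10:
--             return tot_min
--         else:
--             tot_min += 1
--             s = s - min2_10
--     tot_min = tot_min + (s//min11)
--     return tot_min
-- ===== SOURCE B (Python) =====
-- def phoneCall(min1, min2_10, min11, s):
--     # closed-form tier arithmetic instead of the 9-step loop
--     if s < min1:
--         return 0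
--     s -= min1
--     if min2_10 > 0:
--         k = min(9, s // min2_10)
--         if k < 9:
--             return 1 + k
--     return 10 + (s - 9 * min2_10) // min11
-- ===== Notes on version B (the rewrite author's own statement) =====
-- stated objective: simpler
-- what changed: Replaced the 9-iteration subtraction loop over the mid tier by closed-form arithmetic: k = min(9, s // min2_10) affordable mid-tier minutes, then one division for the cheap tier.
import Mathlib
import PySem

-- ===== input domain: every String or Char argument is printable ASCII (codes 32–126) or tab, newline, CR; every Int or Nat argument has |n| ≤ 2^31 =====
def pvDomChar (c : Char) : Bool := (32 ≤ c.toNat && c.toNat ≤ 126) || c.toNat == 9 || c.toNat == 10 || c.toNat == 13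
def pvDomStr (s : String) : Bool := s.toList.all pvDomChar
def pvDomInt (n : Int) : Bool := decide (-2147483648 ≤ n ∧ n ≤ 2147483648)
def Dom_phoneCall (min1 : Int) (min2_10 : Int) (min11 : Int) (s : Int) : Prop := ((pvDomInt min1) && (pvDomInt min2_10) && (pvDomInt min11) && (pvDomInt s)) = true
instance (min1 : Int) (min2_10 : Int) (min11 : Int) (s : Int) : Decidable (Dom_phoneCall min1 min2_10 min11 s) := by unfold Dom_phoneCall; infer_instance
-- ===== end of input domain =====

-- B replaces A's 9-iteration mid-tier subtraction loop by closed-form arithmetic (objective: simpler).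


-- ===== PORT A =====
-- the 'for _ in range(2, 11)' loop with its early return: .inl tot = returned tot, .inr (tot, s) = loop completed
def phoneCallLoop (min2_10 : Int) : List Int → Int → Int → Sum Int (Int × Int)
  | [], tot, s => .inr (tot, s)
  | _ :: rest, tot, s =>
      if s < min2_10 then .inl tot
      else phoneCallLoop min2_10 rest (tot + 1) (s - min2_10)

def phoneCall (min1 : Int) (min2_10 : Int) (min11 : Int) (s : Int) : Int :=
  let tot_min : Int := 0
  if s < min1 then tot_min
  else
    let s := s - min1
    let tot_min := tot_min + 1
    match phoneCallLoop min2_10 (PySem.List.pyRange 2 11 1) tot_min s with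
    | .inl tot_min => tot_min
    | .inr (tot_min, s) => tot_min + PySem.Int.floordiv s min11

-- ===== PORT B =====
def phoneCall_alt (min1 : Int) (min2_10 : Int) (min11 : Int) (s : Int) : Int :=
  if s < min1 then 0
  else
    let s := s - min1
    if min2_10 > 0 then
      let k := min 9 (PySem.Int.floordiv s min2_10)
      if k < 9 then 1 + k
      else 10 + PySem.Int.floordiv (s - 9 * min2_10) min11
    else 10 + PySem.Int.floordiv (s - 9 * min2_10) min11

-- ===== PRECONDITION & SPEC =====
-- Pre_ excludes exactly the inputs where A (and B alike) raises ZeroDivisionError: min11 = 0 and the budget reaches the cheap tier.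
def Pre_phoneCall (min1 : Int) (min2_10 : Int) (min11 : Int) (s : Int) : Prop :=
  min11 ≠ 0 ∨ s < min1 ∨ (0 < min2_10 ∧ s - min1 < 9 * min2_10)
instance (min1 : Int) (min2_10 : Int) (min11 : Int) (s : Int) : Decidable (Pre_phoneCall min1 min2_10 min11 s) := by unfold Pre_phoneCall; infer_instance
def pvWitness_phoneCall : Int × Int × Int × Int := (3, 2, 1, 30)

def Spec_phoneCall (min1 : Int) (min2_10 : Int) (min11 : Int) (s : Int) (out : Int) : Prop := out = phoneCall_alt min1 min2_10 min11 s
instance (min1 : Int) (min2_10 : Int) (min11 : Int) (s : Int) (out : Int) : Decidable (Spec_phoneCall min1 min2_10 min11 s out) := by unfold Spec_phoneCall; infer_instance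

-- ===== CLAIM (what is proved, stated in full; the proofs are below) =====
def Claim_equal_phoneCall : Prop := ∀ (min1 : Int) (min2_10 : Int) (min11 : Int) (s : Int), Dom_phoneCall min1 min2_10 min11 s → Pre_phoneCall min1 min2_10 min11 s → Spec_phoneCall min1 min2_10 min11 s (phoneCall min1 min2_10 min11 s)

-- ===== LEMMAS AND PROOFS =====

-- ===== VERDICT (by name: the statement is the Claim_ definition above) =====
set_option maxHeartbeats 1600000 in
theorem phoneCall_spec : Claim_equal_phoneCall := by
  intro min1 m min11 s _ hpre
  unfold Spec_phoneCall phoneCall phoneCall_alt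
  by_cases h1 : s < min1
  · simp [h1]
  · simp only [h1, if_false]
    have ht0 : 0 ≤ s - min1 := by omega
    have hrange : PySem.List.pyRange 2 11 1 = [2,3,4,5,6,7,8,9,10] := by decide
    rw [hrange]
    by_cases hm : m > 0
    · rw [if_pos hm]
      obtain ⟨k, hk1, hk2, hkeq⟩ : ∃ k, k * m ≤ s - min1 ∧ s - min1 < (k + 1) * m ∧
          PySem.Int.floordiv (s - min1) m = k :=
        ⟨_, ((PySem.Int.floordiv_eq_iff_of_pos hm).mp rfl).1,
          ((PySem.Int.floordiv_eq_iff_of_pos hm).mp rfl).2, rfl⟩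
      rw [hkeq]
      by_cases hk9 : k < 9
      · have hk0 : 0 ≤ k := by nlinarith
        simp only [show min 9 k = k by omega, hk9, if_true]
        interval_cases k <;>
          · simp only [phoneCallLoop]
            split_ifs <;> dsimp only <;> omega
      · have h9m : 9 * m ≤ s - min1 := by nlinarith
        simp only [show ¬ (min 9 k < 9) by omega, if_false]
        simp only [phoneCallLoop]
        split_ifs <;> dsimp only <;> first | omega | (congr 2 <;> ring)
    · rw [if_neg hm]
      simp only [phoneCallLoop]
      split_ifs <;> dsimp only <;> first | omega | (congr 2 <;> ring)
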